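-- pv_equiv track=rewrite | github.com/879372/verifica-o-teste | todas_juntas.py | verificar_estado_cartela
-- ===== SOURCE A (Python) =====
-- def verificar_estado_cartela(cartelas, numeros_sorteados, min_numeros):
--     cartela_kuadra = None
--     cartela_kina = None
--     cartela_keno = None
--
--     for sorteio, numero_sorteado in enumerate(numeros_sorteados, start=1):
--         for cartela_index, cartela in enumerate(cartelas):
--             linhas_completas = [all(numero in numeros_sorteados[:sorteio] for numero in linha) for linha in cartela.values()]
--             linhas_min_numeros = [sum(numero in numeros_sorteados[:sorteio] for numero in linha) >= min_numeros for linha in cartela.values()]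
--
--             if cartela_kuadra is None and any(linhas_min_numeros):
--                 cartela_kuadra = (cartela_index, sorteio)
--
--             if cartela_kina is None and any(linhas_completas):
--                 cartela_kina = (cartela_index, sorteio)
--
--             if cartela_keno is None and all(linhas_completas) and any(linhas_min_numeros):
--                 cartela_keno = (cartela_index, sorteio)
--
--             if cartela_kuadra is not None and cartela_kina is not None and cartela_keno is not None:
--                 break
--         if cartela_kuadra is not None and cartela_kina is not None and cartela_keno is not None:
--             break
--
--     return cartela_kuadra, cartela_kina, cartela_keno
-- ===== SOURCE B (Python) =====
-- # Faster re-implementation: instead of re-scanning the growing prefix of draws for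
-- # every (draw, card) pair, precompute each number's first-draw index once; every
-- # line then gets a closed-form completion draw and threshold draw, and each prize
-- # is the lexicographic minimum of (draw, card index) over the cards.
--
-- def _omin(a, b):
--     # minimum of two optional draws (None = never happens)
--     if a is None:
--         return b
--     if b is None:
--         return a
--     return a if a <= b else b
--
--
-- def _thr(fos, min_numeros, any_draw):
--     # earliest draw at which a line with sorted first-occurrence list `fos`
--     # has at least min_numeros of its numbers drawn
--     if min_numeros <= 0:
--         return any_draw
--     if min_numeros <= len(fos):
--         return fos[min_numeros - 1]
--     return None
--
--
-- def _comp(fos, linha, any_draw):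
--     # earliest draw at which the line is completely drawn
--     if len(fos) == len(linha):
--         return max(fos, default=1) if any_draw is not None else None
--     return None
--
--
-- def _allstep(a, c):
--     # running "all lines complete by" draw
--     if a is None or c is None:
--         return None
--     return max(a, c)
--
--
-- def _best(best, d, ci):
--     # keep the lexicographically least (draw, card_index)
--     if d is None:
--         return best
--     if best is None or (d, ci) < best:
--         return (d, ci)
--     return best
--
--
-- def verificar_estado_cartela(cartelas, numeros_sorteados, min_numeros):
--     first = {}
--     for i, n in enumerate(numeros_sorteados, 1):
--         if n not in first:
--             first[n] = i
--     any_draw = 1 if numeros_sorteados else None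
--
--     best = (None, None, None)
--     for ci, cartela in enumerate(cartelas):
--         kuadra = None
--         kina = None
--         allc = any_draw
--         for linha in cartela.values():
--             fos = sorted(first[n] for n in linha if n in first)
--             kuadra = _omin(kuadra, _thr(fos, min_numeros, any_draw))
--             comp = _comp(fos, linha, any_draw)
--             kina = _omin(kina, comp)
--             allc = _allstep(allc, comp)
--         keno = None if (kuadra is None or allc is None) else max(allc, kuadra)
--         best = (_best(best[0], kuadra, ci), _best(best[1], kina, ci), _best(best[2], keno, ci))
--     return tuple((b[1], b[0]) if b is not None else None for b in best)
-- ===== Notes on version B (the rewrite author's own statement) =====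
-- stated objective: faster
-- what changed: Replaces the draw-by-draw rescan of every card against a growing prefix of the draw list by a one-pass number->first-draw-index map plus a closed-form completion/threshold draw per line, taking the lexicographic minimum of (draw, card index) per prize.
import Mathlib
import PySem

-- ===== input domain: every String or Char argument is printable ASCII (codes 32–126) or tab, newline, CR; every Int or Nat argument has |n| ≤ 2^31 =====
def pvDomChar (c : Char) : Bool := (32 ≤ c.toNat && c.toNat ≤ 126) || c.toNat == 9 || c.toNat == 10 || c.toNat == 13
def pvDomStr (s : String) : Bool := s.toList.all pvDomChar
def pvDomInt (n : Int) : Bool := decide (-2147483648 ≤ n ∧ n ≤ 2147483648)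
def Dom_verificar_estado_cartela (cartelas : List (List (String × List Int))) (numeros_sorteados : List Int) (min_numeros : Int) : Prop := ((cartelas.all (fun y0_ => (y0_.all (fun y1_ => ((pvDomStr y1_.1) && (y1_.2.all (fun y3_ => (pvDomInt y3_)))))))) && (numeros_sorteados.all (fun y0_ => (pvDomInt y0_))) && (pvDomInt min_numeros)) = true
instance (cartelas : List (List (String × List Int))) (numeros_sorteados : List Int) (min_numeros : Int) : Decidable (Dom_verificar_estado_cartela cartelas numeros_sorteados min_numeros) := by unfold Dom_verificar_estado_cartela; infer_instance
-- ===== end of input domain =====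

-- B precomputes each number's first-draw index and a closed-form per-line draw instead of
-- A's rescan of a growing draw prefix for every (draw, card) pair (objective: faster).

-- ===== PORT A =====
-- state: (cartela_kuadra, cartela_kina, cartela_keno)
def pvAFull (st : (Option (Int × Int)) × (Option (Int × Int)) × (Option (Int × Int))) : Bool :=
  st.1.isSome && st.2.1.isSome && st.2.2.isSome

-- the body of A's inner loop for one (cartela_index, cartela) pair at draw `sorteio`
def pvAStep (numeros_sorteados : List Int) (min_numeros : Int) (sorteio : Int)
    (p : Int × List (String × List Int))
    (st : (Option (Int × Int)) × (Option (Int × Int)) × (Option (Int × Int))) :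
    (Option (Int × Int)) × (Option (Int × Int)) × (Option (Int × Int)) :=
  -- numeros_sorteados[:sorteio]
  let pref := PySem.List.slice numeros_sorteados none (some sorteio)
  let linhas_completas := (PySem.Dict.ofList p.2).values.map
    (fun linha => linha.all (fun numero => pref.contains numero))
  let linhas_min_numeros := (PySem.Dict.ofList p.2).values.map
    (fun linha => decide ((linha.map (fun numero => if pref.contains numero then (1 : Int) else 0)).sum ≥ min_numeros))
  let cartela_kuadra := if st.1 = none ∧ linhas_min_numeros.any id then some (p.1, sorteio) else st.1
  let cartela_kina := if st.2.1 = none ∧ linhas_completas.any id then some (p.1, sorteio) else st.2.1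
  let cartela_keno := if st.2.2 = none ∧ (linhas_completas.all id ∧ linhas_min_numeros.any id) then some (p.1, sorteio) else st.2.2
  (cartela_kuadra, cartela_kina, cartela_keno)

-- 'for cartela_index, cartela in enumerate(cartelas): …  if … break'
def pvAInner (numeros_sorteados : List Int) (min_numeros : Int) (sorteio : Int) :
    List (Int × List (String × List Int)) →
    (Option (Int × Int)) × (Option (Int × Int)) × (Option (Int × Int)) →
    (Option (Int × Int)) × (Option (Int × Int)) × (Option (Int × Int))
  | [], st => st
  | p :: rest, st =>
    let st' := pvAStep numeros_sorteados min_numeros sorteio p st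
    if pvAFull st' then st' else pvAInner numeros_sorteados min_numeros sorteio rest st'

-- 'for sorteio, numero_sorteado in enumerate(numeros_sorteados, start=1): …  if … break'
def pvAOuter (cartelas : List (List (String × List Int))) (numeros_sorteados : List Int) (min_numeros : Int) :
    List (Int × Int) →
    (Option (Int × Int)) × (Option (Int × Int)) × (Option (Int × Int)) →
    (Option (Int × Int)) × (Option (Int × Int)) × (Option (Int × Int))
  | [], st => st
  | q :: rest, st =>
    let st' := pvAInner numeros_sorteados min_numeros q.1 (PySem.List.enumerate cartelas 0) st
    if pvAFull st' then st' else pvAOuter cartelas numeros_sorteados min_numeros rest st'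

def verificar_estado_cartela (cartelas : List (List (String × List Int))) (numeros_sorteados : List Int) (min_numeros : Int) : (Option (Int × Int)) × (Option (Int × Int)) × (Option (Int × Int)) :=
  pvAOuter cartelas numeros_sorteados min_numeros (PySem.List.enumerate numeros_sorteados 1) (none, none, none)

-- ===== PORT B =====
-- first = {}; for i, n in enumerate(numeros_sorteados, 1): if n not in first: first[n] = i
def pvBFirst (numeros_sorteados : List Int) : PySem.Dict Int Int :=
  (PySem.List.enumerate numeros_sorteados 1).foldl
    (fun first p => if first.contains p.2 then first else first.insert p.2 p.1) PySem.Dict.empty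

-- fos = sorted(first[n] for n in linha if n in first)   ('n in first' then 'first[n]' is .get?)
def pvBFos (first : PySem.Dict Int Int) (linha : List Int) : List Int :=
  PySem.List.sorted (linha.filterMap (fun n => first.get? n)) (fun v => v) false

def pvOmin (a b : Option Int) : Option Int :=
  match a, b with
  | none, b => b
  | some x, none => some x
  | some x, some y => if x ≤ y then some x else some y

def pvBThr (fos : List Int) (min_numeros : Int) (any_draw : Option Int) : Option Int :=
  if min_numeros ≤ 0 then any_draw
  else if min_numeros ≤ (fos.length : Int) then
    -- fos[min_numeros - 1]: index provably in range here
    some (PySem.List.pyGetD fos (min_numeros - 1) 0)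
  else none

def pvBComp (fos : List Int) (linha : List Int) (any_draw : Option Int) : Option Int :=
  if fos.length = linha.length then
    match any_draw with
    | some _ => some (PySem.List.maxD fos (fun v => v) 1)   -- max(fos, default=1)
    | none => none
  else none

def pvBAllStep (a c : Option Int) : Option Int :=
  match a, c with
  | some x, some y => some (max x y)
  | _, _ => none

-- the body of B's per-line loop; state (kuadra, kina, allc)
def pvBLineStep (first : PySem.Dict Int Int) (min_numeros : Int) (any_draw : Option Int)
    (st : Option Int × Option Int × Option Int) (linha : List Int) :
    Option Int × Option Int × Option Int :=
  let fos := pvBFos first linha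
  let comp := pvBComp fos linha any_draw
  (pvOmin st.1 (pvBThr fos min_numeros any_draw), pvOmin st.2.1 comp, pvBAllStep st.2.2 comp)

def pvBCard (first : PySem.Dict Int Int) (min_numeros : Int) (any_draw : Option Int)
    (cart : List (String × List Int)) : Option Int × Option Int × Option Int :=
  ((PySem.Dict.ofList cart).values).foldl (pvBLineStep first min_numeros any_draw) (none, none, any_draw)

def pvBKeno (kuadra allc : Option Int) : Option Int :=
  match kuadra, allc with
  | some k, some a => some (max a k)
  | _, _ => none

-- if d is not None and (best is None or (d, ci) < best): best = (d, ci)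
def pvBBest (best : Option (Int × Int)) (d : Option Int) (ci : Int) : Option (Int × Int) :=
  match d with
  | none => best
  | some v =>
    match best with
    | none => some (v, ci)
    | some b => if v < b.1 ∨ (v = b.1 ∧ ci < b.2) then some (v, ci) else some b

def verificar_estado_cartela_alt (cartelas : List (List (String × List Int))) (numeros_sorteados : List Int) (min_numeros : Int) : (Option (Int × Int)) × (Option (Int × Int)) × (Option (Int × Int)) :=
  let first := pvBFirst numeros_sorteados
  let any_draw : Option Int := if numeros_sorteados.isEmpty then none else some 1
  let best := (PySem.List.enumerate cartelas 0).foldl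
    (fun (best : Option (Int × Int) × Option (Int × Int) × Option (Int × Int)) p =>
      let r := pvBCard first min_numeros any_draw p.2
      let keno := pvBKeno r.1 r.2.2
      (pvBBest best.1 r.1 p.1, pvBBest best.2.1 r.2.1 p.1, pvBBest best.2.2 keno p.1))
    (none, none, none)
  (best.1.map (fun b => (b.2, b.1)), best.2.1.map (fun b => (b.2, b.1)), best.2.2.map (fun b => (b.2, b.1)))

-- ===== PRECONDITION & SPEC =====
def Spec_verificar_estado_cartela (cartelas : List (List (String × List Int))) (numeros_sorteados : List Int) (min_numeros : Int) (out : (Option (Int × Int)) × (Option (Int × Int)) × (Option (Int × Int))) : Prop := out = verificar_estado_cartela_alt cartelas numeros_sorteados min_numeros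
instance (cartelas : List (List (String × List Int))) (numeros_sorteados : List Int) (min_numeros : Int) (out : (Option (Int × Int)) × (Option (Int × Int)) × (Option (Int × Int))) : Decidable (Spec_verificar_estado_cartela cartelas numeros_sorteados min_numeros out) := by unfold Spec_verificar_estado_cartela; infer_instance

-- ===== CLAIM (what is proved, stated in full; the proofs are below) =====
def Claim_equal_verificar_estado_cartela : Prop := ∀ (cartelas : List (List (String × List Int))) (numeros_sorteados : List Int) (min_numeros : Int), Dom_verificar_estado_cartela cartelas numeros_sorteados min_numeros → Spec_verificar_estado_cartela cartelas numeros_sorteados min_numeros (verificar_estado_cartela cartelas numeros_sorteados min_numeros)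

-- ===== LEMMAS AND PROOFS =====

-- ---- generic fold helpers ----
theorem pvFoldlProd3 {α β1 β2 β3 : Type} (f : β1 → α → β1) (g : β2 → α → β2) (h : β3 → α → β3)
    (l : List α) (a : β1) (b : β2) (c : β3) :
    l.foldl (fun st x => (f st.1 x, g st.2.1 x, h st.2.2 x)) (a, b, c)
      = (l.foldl f a, l.foldl g b, l.foldl h c) := by
  induction l generalizing a b c with
  | nil => rfl
  | cons x t ih => simpa using ih (f a x) (g b x) (h c x)

theorem pvFoldlFirst {α β : Type} (c : α → Bool) (out : α → β) (l : List α) (o0 : Option β) :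
    l.foldl (fun o x => if o = none ∧ c x = true then some (out x) else o) o0
      = o0.or ((l.find? c).map out) := by
  induction l generalizing o0 with
  | nil => simp
  | cons x t ih =>
    rw [List.foldl_cons, ih]
    by_cases h : c x = true
    · rw [List.find?_cons_of_pos h]
      cases o0 <;> simp [h]
    · rw [List.find?_cons_of_neg (by simpa using h)]
      cases o0 <;> simp [h]

theorem pvFoldlId {α β : Type} (f : β → α → β) (P : β → Prop)
    (hf : ∀ b x, P b → f b x = b) (l : List α) (b : β) (hb : P b) : l.foldl f b = b := by
  induction l generalizing b with
  | nil => rfl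
  | cons x t ih => rw [List.foldl_cons, hf b x hb]; exact ih b hb

theorem pvFoldlFlatMap {α β γ : Type} (g : γ → List α) (f : β → α → β) (l : List γ) (b : β) :
    (l.flatMap g).foldl f b = l.foldl (fun b q => (g q).foldl f b) b := by
  induction l generalizing b with
  | nil => rfl
  | cons x t ih => rw [List.flatMap_cons, List.foldl_append, List.foldl_cons, ih]

theorem pvFindFirst {α : Type} (R : α → α → Prop) (l : List α) (hp : l.Pairwise R)
    (c : α → Bool) (x : α) (hx : l.find? c = some x) :
    ∀ y ∈ l, c y = true → x = y ∨ R x y := by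
  induction l with
  | nil => simp at hx
  | cons a t ih =>
    rcases List.pairwise_cons.mp hp with ⟨ha, hp'⟩
    by_cases hca : c a = true
    · rw [List.find?_cons_of_pos hca] at hx
      obtain rfl : a = x := by simpa using hx
      intro y hy hcy
      rcases List.mem_cons.mp hy with rfl | hyt
      · exact Or.inl rfl
      · exact Or.inr (ha y hyt)
    · rw [List.find?_cons_of_neg (by simpa using hca)] at hx
      intro y hy hcy
      rcases List.mem_cons.mp hy with rfl | hyt
      · exact absurd hcy hca
      · exact ih hp' hx y hyt hcy

-- ---- A-side reduction to a find? over s-major (draw, card) pairs ----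
def pvPref (numeros_sorteados : List Int) (s : Int) : List Int :=
  PySem.List.slice numeros_sorteados none (some s)

def pvCnt (numeros_sorteados : List Int) (s : Int) (l : List Int) : Int :=
  (l.map (fun numero => if (pvPref numeros_sorteados s).contains numero then (1 : Int) else 0)).sum

def pvComp (numeros_sorteados : List Int) (s : Int) (l : List Int) : Bool :=
  l.all (fun numero => (pvPref numeros_sorteados s).contains numero)

def pvVals (cart : List (String × List Int)) : List (List Int) :=
  (PySem.Dict.ofList cart).values

def pvCondK (numeros_sorteados : List Int) (min_numeros : Int) (cart : List (String × List Int)) (s : Int) : Bool :=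
  (pvVals cart).any (fun l => decide (pvCnt numeros_sorteados s l ≥ min_numeros))

def pvCondI (numeros_sorteados : List Int) (cart : List (String × List Int)) (s : Int) : Bool :=
  (pvVals cart).any (fun l => pvComp numeros_sorteados s l)

def pvCondE (numeros_sorteados : List Int) (min_numeros : Int) (cart : List (String × List Int)) (s : Int) : Bool :=
  (pvVals cart).all (fun l => pvComp numeros_sorteados s l) && pvCondK numeros_sorteados min_numeros cart s

def pvPairs (cartelas : List (List (String × List Int))) (numeros_sorteados : List Int) :
    List (Int × (Int × List (String × List Int))) :=
  (PySem.List.enumerate numeros_sorteados 1).flatMap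
    (fun q => (PySem.List.enumerate cartelas 0).map (fun p => (q.1, p)))

theorem pvAStep_decomp (n : List Int) (m s : Int) (p : Int × List (String × List Int))
    (st : (Option (Int × Int)) × (Option (Int × Int)) × (Option (Int × Int))) :
    pvAStep n m s p st =
      ((if st.1 = none ∧ pvCondK n m p.2 s = true then some (p.1, s) else st.1),
       (if st.2.1 = none ∧ pvCondI n p.2 s = true then some (p.1, s) else st.2.1),
       (if st.2.2 = none ∧ pvCondE n m p.2 s = true then some (p.1, s) else st.2.2)) := by
  simp only [pvAStep, pvCondK, pvCondI, pvCondE, pvCnt, pvComp, pvVals, pvPref,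
    List.any_map, List.all_map, Function.id_comp, Bool.and_eq_true]
  rfl

theorem pvAStep_full (n : List Int) (m s : Int) (p : Int × List (String × List Int)) (st)
    (h : pvAFull st = true) : pvAStep n m s p st = st := by
  simp only [pvAFull, Bool.and_eq_true, Option.isSome_iff_ne_none] at h
  obtain ⟨⟨h1, h2⟩, h3⟩ := h
  simp [pvAStep, h1, h2, h3]

theorem pvAInner_eq (n : List Int) (m s : Int) (l : List (Int × List (String × List Int))) (st) :
    pvAInner n m s l st = l.foldl (fun st p => pvAStep n m s p st) st := by
  induction l generalizing st with
  | nil => rfl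
  | cons p rest ih =>
    rw [List.foldl_cons]
    show (if pvAFull (pvAStep n m s p st) = true then pvAStep n m s p st
          else pvAInner n m s rest (pvAStep n m s p st)) = _
    by_cases h : pvAFull (pvAStep n m s p st) = true
    · rw [if_pos h]
      exact (pvFoldlId _ (fun st => pvAFull st = true)
        (fun b x hb => pvAStep_full n m s x b hb) rest _ h).symm
    · rw [if_neg h, ih]

theorem pvAOuter_eq (c : List (List (String × List Int))) (n : List Int) (m : Int)
    (l : List (Int × Int)) (st) :
    pvAOuter c n m l st
      = l.foldl (fun st q => (PySem.List.enumerate c 0).foldl (fun st p => pvAStep n m q.1 p st) st) st := by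
  induction l generalizing st with
  | nil => rfl
  | cons q rest ih =>
    rw [List.foldl_cons]
    rw [show pvAOuter c n m (q :: rest) st =
        (if pvAFull (pvAInner n m q.1 (PySem.List.enumerate c 0) st) = true
         then pvAInner n m q.1 (PySem.List.enumerate c 0) st
         else pvAOuter c n m rest (pvAInner n m q.1 (PySem.List.enumerate c 0) st)) from rfl]
    rw [pvAInner_eq]
    by_cases h : pvAFull ((PySem.List.enumerate c 0).foldl (fun st p => pvAStep n m q.1 p st) st) = true
    · rw [if_pos h]
      refine (pvFoldlId _ (fun st => pvAFull st = true) ?_ rest _ h).symm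
      intro b x hb
      exact pvFoldlId _ (fun st => pvAFull st = true)
        (fun b' x' hb' => pvAStep_full n m x.1 x' b' hb') _ b hb
    · rw [if_neg h, ih]

theorem pvA_char (c : List (List (String × List Int))) (n : List Int) (m : Int) :
    verificar_estado_cartela c n m =
      (((pvPairs c n).find? (fun x => pvCondK n m x.2.2 x.1)).map (fun x => (x.2.1, x.1)),
       ((pvPairs c n).find? (fun x => pvCondI n x.2.2 x.1)).map (fun x => (x.2.1, x.1)),
       ((pvPairs c n).find? (fun x => pvCondE n m x.2.2 x.1)).map (fun x => (x.2.1, x.1))) := by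
  unfold verificar_estado_cartela
  rw [pvAOuter_eq]
  have hfm : (PySem.List.enumerate n 1).foldl
      (fun st q => (PySem.List.enumerate c 0).foldl (fun st p => pvAStep n m q.1 p st) st)
      (none, none, none)
      = (pvPairs c n).foldl (fun st x => pvAStep n m x.1 x.2 st) (none, none, none) := by
    rw [pvPairs, pvFoldlFlatMap]
    simp only [List.foldl_map]
  rw [hfm]
  have hext : (pvPairs c n).foldl (fun st x => pvAStep n m x.1 x.2 st) (none, none, none)
      = (pvPairs c n).foldl (fun st x =>
          ((if st.1 = none ∧ pvCondK n m x.2.2 x.1 = true then some (x.2.1, x.1) else st.1),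
           (if st.2.1 = none ∧ pvCondI n x.2.2 x.1 = true then some (x.2.1, x.1) else st.2.1),
           (if st.2.2 = none ∧ pvCondE n m x.2.2 x.1 = true then some (x.2.1, x.1) else st.2.2)))
          (none, none, none) :=
    by exact List.foldl_ext _ _ _ fun a x _ => pvAStep_decomp n m x.1 x.2 a
  have h3 := pvFoldlProd3
    (fun (o : Option (Int × Int)) (x : Int × (Int × List (String × List Int))) =>
      if o = none ∧ pvCondK n m x.2.2 x.1 = true then some (x.2.1, x.1) else o)
    (fun (o : Option (Int × Int)) (x : Int × (Int × List (String × List Int))) =>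
      if o = none ∧ pvCondI n x.2.2 x.1 = true then some (x.2.1, x.1) else o)
    (fun (o : Option (Int × Int)) (x : Int × (Int × List (String × List Int))) =>
      if o = none ∧ pvCondE n m x.2.2 x.1 = true then some (x.2.1, x.1) else o)
    (pvPairs c n) none none none
  rw [hext, h3, pvFoldlFirst, pvFoldlFirst, pvFoldlFirst]
  simp

-- ---- first-occurrence map ----
def pvFo (n : List Int) (x : Int) : Option Int := (n.idxOf? x).map (fun (k : Nat) => 1 + (k : Int))

theorem pvIdxLt (n : List Int) (x : Int) (k : Nat) (h : n.idxOf? x = some k) : k < n.length := by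
  induction n generalizing k with
  | nil => simp at h
  | cons a t ih =>
    rw [List.idxOf?_cons] at h
    by_cases hax : (a == x) = true
    · rw [if_pos hax] at h
      simp only [Option.some.injEq] at h
      simp [← h]
    · rw [if_neg hax] at h
      rcases Option.map_eq_some_iff.mp h with ⟨k', hk', rfl⟩
      have := ih k' hk'
      simp
      omega

theorem pvFo_ge1 (n : List Int) (x v : Int) (h : pvFo n x = some v) : 1 ≤ v := by
  rcases Option.map_eq_some_iff.mp h with ⟨k, _, rfl⟩
  omega

theorem pvFo_cons_self (a : Int) (t : List Int) : pvFo (a :: t) a = some 1 := by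
  simp [pvFo, List.idxOf?_cons]

theorem pvFo_cons_ne (a x : Int) (t : List Int) (hx : x ≠ a) :
    pvFo (a :: t) x = (pvFo t x).map (· + 1) := by
  simp only [pvFo, List.idxOf?_cons]
  rw [if_neg (by simpa using fun h => hx h.symm)]
  cases hio : t.idxOf? x <;> simp
  omega

theorem pvFirstLoop (xs : List Int) (st : Int) (d : PySem.Dict Int Int) (x : Int) :
    ((PySem.List.enumerate xs st).foldl
        (fun first p => if first.contains p.2 then first else first.insert p.2 p.1) d).get? x
      = (d.get? x).or ((xs.idxOf? x).map (fun (k : Nat) => st + (k : Int))) := by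
  induction xs generalizing st d with
  | nil => simp [PySem.List.enumerate_nil]
  | cons a t ih =>
    have hcons : x ≠ a → ((a :: t).idxOf? x).map (fun (k : Nat) => st + (k : Int))
        = (t.idxOf? x).map (fun (k : Nat) => st + 1 + (k : Int)) := by
      intro hx
      rw [List.idxOf?_cons, if_neg (by simpa using fun h => hx h.symm)]
      cases hio : t.idxOf? x <;> simp
      omega
    rw [PySem.List.enumerate_cons]
    simp only [List.foldl_cons]
    by_cases h : d.contains a = true
    · rw [if_pos h, ih]
      by_cases hx : x = a
      · subst hx
        have hiso : (d.get? x).isSome := by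
          rw [← PySem.Dict.contains_eq_isSome_get?]; exact h
        obtain ⟨v, hv⟩ := Option.isSome_iff_exists.mp hiso
        simp [hv]
      · rw [hcons hx]
    · rw [if_neg h, ih]
      by_cases hx : x = a
      · subst hx
        have h0 : d.get? x = none := (PySem.Dict.get?_eq_none_iff_contains d x).mpr (by simpa using h)
        rw [PySem.Dict.get?_insert_self]
        simp [h0, List.idxOf?_cons]
      · rw [PySem.Dict.get?_insert_of_ne d st hx, hcons hx]

theorem pvFirst_get (n : List Int) (x : Int) : (pvBFirst n).get? x = pvFo n x := by
  unfold pvBFirst pvFo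
  rw [pvFirstLoop]
  simp [PySem.Dict.get?_empty]

theorem pvFo_bounds (n : List Int) (x v : Int) (h : pvFo n x = some v) :
    1 ≤ v ∧ v ≤ (n.length : Int) := by
  refine ⟨pvFo_ge1 n x v h, ?_⟩
  rcases Option.map_eq_some_iff.mp h with ⟨k, hk, rfl⟩
  have := pvIdxLt n x k hk
  omega

theorem pvMemTake (n : List Int) (x : Int) (k : Nat) :
    x ∈ n.take k ↔ ∃ v, pvFo n x = some v ∧ v ≤ (k : Int) := by
  induction n generalizing k with
  | nil =>
    simp only [List.take_nil, List.not_mem_nil, false_iff]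
    rintro ⟨v, hv, _⟩
    simp [pvFo] at hv
  | cons a t ih =>
    cases k with
    | zero =>
      simp only [List.take_zero, List.not_mem_nil, false_iff]
      rintro ⟨v, hv, hle⟩
      have := pvFo_ge1 _ _ _ hv
      omega
    | succ k' =>
      rw [List.take_succ_cons]
      by_cases hx : x = a
      · subst hx
        simp only [List.mem_cons, true_or, true_iff]
        exact ⟨1, pvFo_cons_self x t, by push_cast; omega⟩
      · rw [List.mem_cons]
        constructor
        · rintro (rfl | hmem)
          · exact absurd rfl hx
          · rcases (ih k').mp hmem with ⟨v, hv, hle⟩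
            refine ⟨v + 1, ?_, by push_cast at hle ⊢; omega⟩
            rw [pvFo_cons_ne a x t hx, hv]
            rfl
        · rintro ⟨v, hv, hle⟩
          rw [pvFo_cons_ne a x t hx] at hv
          rcases Option.map_eq_some_iff.mp hv with ⟨w, hw, rfl⟩
          refine Or.inr ((ih k').mpr ⟨w, hw, by push_cast at hle ⊢; omega⟩)

theorem pvContainsPref (n : List Int) (x s : Int) (hs : 0 ≤ s) :
    (pvPref n s).contains x = true ↔ ∃ v, pvFo n x = some v ∧ v ≤ s := by
  rw [pvPref, PySem.List.slice_to n hs, List.contains_iff_mem, pvMemTake n x s.toNat]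
  constructor <;> rintro ⟨v, hv, hle⟩ <;> refine ⟨v, hv, ?_⟩ <;>
    rw [Int.toNat_of_nonneg hs] at * <;> omega

-- ---- counting and the sorted threshold ----
def pvFosR (n : List Int) (l : List Int) : List Int := l.filterMap (pvFo n)

theorem pvCnt_eq (n : List Int) (s : Int) (hs : 0 ≤ s) (l : List Int) :
    pvCnt n s l = ((pvFosR n l).countP (fun v => decide (v ≤ s)) : Int) := by
  unfold pvCnt pvFosR
  rw [PySem.List.sum_map_ite_one_zero, List.countP_filterMap]
  congr 1
  apply List.countP_congr
  intro a _
  rcases hfo : pvFo n a with _ | v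
  · simp only [Option.map_none, Option.getD_none]
    have hnot : ¬ (pvPref n s).contains a = true := by
      rw [pvContainsPref n a s hs]
      rintro ⟨v, hv, _⟩
      rw [hfo] at hv
      simp at hv
    simpa using hnot
  · simp only [Option.map_some, Option.getD_some]
    by_cases hvs : v ≤ s
    · rw [(pvContainsPref n a s hs).mpr ⟨v, hfo, hvs⟩]
      simp [hvs]
    · have hnc : (pvPref n s).contains a = false := by
        have hnot : ¬ (pvPref n s).contains a = true := by
          rw [pvContainsPref n a s hs]
          rintro ⟨w, hw, hws⟩
          rw [hfo] at hw
          cases hw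
          exact hvs hws
        simpa using hnot
      rw [hnc]
      simp [hvs]

theorem pvFos_perm (n : List Int) (l : List Int) :
    (pvBFos (pvBFirst n) l).Perm (pvFosR n l) := by
  unfold pvBFos pvFosR
  have hfun : (fun n' => (pvBFirst n).get? n') = pvFo n := funext (pvFirst_get n)
  rw [hfun]
  exact PySem.List.sorted_perm _ _ _

theorem pvSortedCount (fos : List Int) (h : fos.Pairwise (· ≤ ·)) (m : Nat) (hm : 0 < m) (s : Int) :
    (m ≤ fos.countP (fun v => decide (v ≤ s))) ↔ ∃ hlt : m - 1 < fos.length, fos[m-1] ≤ s := by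
  induction fos generalizing m with
  | nil =>
    simp only [List.countP_nil, List.length_nil]
    constructor
    · omega
    · rintro ⟨hlt, _⟩; omega
  | cons a t ih =>
    have hha : ∀ y ∈ t, a ≤ y := (List.pairwise_cons.mp h).1
    have ht := (List.pairwise_cons.mp h).2
    rw [List.countP_cons]
    by_cases has : a ≤ s
    · simp only [has, decide_true, if_pos]
      obtain ⟨m', rfl⟩ : ∃ m', m = m' + 1 := ⟨m - 1, by omega⟩
      cases m' with
      | zero =>
        constructor
        · intro _
          refine ⟨by simp, ?_⟩
          simpa using has
        · intro _
          omega
      | succ m'' =>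
        have iht := ih ht (m'' + 1) (by omega)
        rw [show m'' + 1 + 1 - 1 = m'' + 1 from rfl]
        constructor
        · intro hle
          rcases iht.mp (by omega) with ⟨hlt, hel⟩
          refine ⟨by simp only [List.length_cons]; omega, ?_⟩
          simpa using hel
        · rintro ⟨hlt, hel⟩
          have hlt' : m'' + 1 - 1 < t.length := by simp only [List.length_cons] at hlt; omega
          have := iht.mpr ⟨hlt', by simpa using hel⟩
          omega
    · have h0 : t.countP (fun v => decide (v ≤ s)) = 0 :=
        List.countP_eq_zero.mpr (fun y hy => by
          simp only [decide_eq_true_eq]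
          have := hha y hy
          omega)
      rw [if_neg (by simp [has]), h0]
      constructor
      · omega
      · rintro ⟨hlt, hel⟩
        exfalso
        have hmem : (a :: t)[m-1] ∈ a :: t := List.getElem_mem hlt
        rcases List.mem_cons.mp hmem with he | hmemt
        · rw [he] at hel
          exact has hel
        · exact has (le_trans (hha _ hmemt) hel)

-- ---- per-line semantics ----
theorem pvFilterMapLen {α β : Type} (f : α → Option β) (l : List α) :
    (l.filterMap f).length = l.length ↔ ∀ x ∈ l, (f x).isSome := by
  induction l with
  | nil => simp
  | cons a t ih =>
    rw [List.filterMap_cons]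
    cases hfa : f a with
    | none =>
      simp only [List.length_cons]
      constructor
      · intro h
        exfalso
        have := List.length_filterMap_le f t
        omega
      · intro h
        have := h a (by simp)
        rw [hfa] at this
        simp at this
    | some b =>
      simp only [List.length_cons]
      constructor
      · intro h x hx
        rcases List.mem_cons.mp hx with rfl | hxt
        · simp [hfa]
        · exact (ih.mp (by omega)) x hxt
      · intro h
        have := ih.mpr (fun x hx => h x (List.mem_cons_of_mem a hx))
        omega

theorem pvMemFos (n : List Int) (l : List Int) (v : Int) :
    v ∈ pvBFos (pvBFirst n) l ↔ ∃ x ∈ l, pvFo n x = some v := by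
  rw [(pvFos_perm n l).mem_iff]
  simp [pvFosR, List.mem_filterMap]

theorem pvFosLen (n : List Int) (l : List Int) :
    (pvBFos (pvBFirst n) l).length = (pvFosR n l).length := (pvFos_perm n l).length_eq

theorem pvFosPairwise (first : PySem.Dict Int Int) (l : List Int) :
    (pvBFos first l).Pairwise (· ≤ ·) := by
  have := PySem.List.sorted_pairwise (l.filterMap (fun x => first.get? x)) (fun v => v)
  simpa [pvBFos] using this

theorem pvLenPos (n : List Int) (s : Int) (hs1 : 1 ≤ s) (hs2 : s ≤ (n.length : Int)) :
    0 < n.length := by omega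

theorem pvAdSome (n : List Int) (hlen : 0 < n.length) :
    (if n.isEmpty then none else some 1 : Option Int) = some 1 := by
  cases n with
  | nil => simp at hlen
  | cons a t => rfl

theorem pvThr_sem (n : List Int) (m : Int) (l : List Int) (s : Int)
    (hs1 : 1 ≤ s) (hs2 : s ≤ (n.length : Int)) :
    (pvCnt n s l ≥ m) ↔
      ∃ v, pvBThr (pvBFos (pvBFirst n) l) m (if n.isEmpty then none else some 1) = some v ∧ v ≤ s := by
  have hlen := pvLenPos n s hs1 hs2
  have hnil : ¬ n = [] := by intro h; rw [h] at hlen; simp at hlen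
  by_cases hm : m ≤ 0
  · refine iff_of_true ?_ ⟨1, ?_, hs1⟩
    · rw [ge_iff_le, pvCnt_eq n s (by omega) l]
      have := Nat.zero_le ((pvFosR n l).countP (fun v => decide (v ≤ s)))
      omega
    · simp [pvBThr, hm, hnil]
  · rw [ge_iff_le, pvCnt_eq n s (by omega) l, ← (pvFos_perm n l).countP_eq]
    have hcast : (m ≤ ((pvBFos (pvBFirst n) l).countP (fun v => decide (v ≤ s)) : Int)) ↔
        m.toNat ≤ (pvBFos (pvBFirst n) l).countP (fun v => decide (v ≤ s)) := by omega
    rw [hcast, pvSortedCount _ (pvFosPairwise _ l) m.toNat (by omega) s]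
    by_cases hml : m ≤ ((pvBFos (pvBFirst n) l).length : Int)
    · have hidx0 : 0 ≤ m - 1 := by omega
      have hidx1 : m - 1 < ((pvBFos (pvBFirst n) l).length : Int) := by omega
      have hg : PySem.List.pyGetD (pvBFos (pvBFirst n) l) (m - 1) 0
          = (pvBFos (pvBFirst n) l)[(m-1).toNat] :=
        PySem.List.pyGetD_eq_getElem _ _ hidx0 hidx1
      have hnat : (m - 1).toNat = m.toNat - 1 := by omega
      rw [show pvBThr (pvBFos (pvBFirst n) l) m (if n.isEmpty then none else some 1)
          = some (PySem.List.pyGetD (pvBFos (pvBFirst n) l) (m - 1) 0) from by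
        simp [pvBThr, hm, hml]]
      constructor
      · rintro ⟨hlt, hel⟩
        refine ⟨_, rfl, ?_⟩
        rw [hg]
        simp only [hnat]
        exact hel
      · rintro ⟨v, hv, hvs⟩
        obtain rfl : PySem.List.pyGetD (pvBFos (pvBFirst n) l) (m - 1) 0 = v := by
          simpa using hv
        rw [hg] at hvs
        simp only [hnat] at hvs
        exact ⟨by omega, hvs⟩
    · rw [show pvBThr (pvBFos (pvBFirst n) l) m (if n.isEmpty then none else some 1) = none from by
        simp [pvBThr, hm, hml]]
      constructor
      · rintro ⟨hlt, _⟩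
        exfalso
        omega
      · rintro ⟨v, hv, _⟩
        simp at hv

theorem pvThr_bnd (n : List Int) (m : Int) (l : List Int) (v : Int)
    (h : pvBThr (pvBFos (pvBFirst n) l) m (if n.isEmpty then none else some 1) = some v) :
    1 ≤ v ∧ v ≤ (n.length : Int) := by
  unfold pvBThr at h
  by_cases hm : m ≤ 0
  · rw [if_pos hm] at h
    by_cases hne : n.isEmpty
    · rw [if_pos hne] at h
      simp at h
    · rw [if_neg hne] at h
      obtain rfl : (1 : Int) = v := by simpa using h
      have : n ≠ [] := by simpa [List.isEmpty_iff] using hne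
      have : 0 < n.length := List.length_pos_iff.mpr this
      omega
  · rw [if_neg hm] at h
    by_cases hml : m ≤ ((pvBFos (pvBFirst n) l).length : Int)
    · rw [if_pos hml] at h
      obtain rfl : PySem.List.pyGetD (pvBFos (pvBFirst n) l) (m - 1) 0 = v := by simpa using h
      have hg : PySem.List.pyGetD (pvBFos (pvBFirst n) l) (m - 1) 0
          = (pvBFos (pvBFirst n) l)[(m-1).toNat] :=
        PySem.List.pyGetD_eq_getElem _ _ (by omega) (by omega)
      have hmem : PySem.List.pyGetD (pvBFos (pvBFirst n) l) (m - 1) 0 ∈ pvBFos (pvBFirst n) l := by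
        rw [hg]
        exact List.getElem_mem _
      rcases (pvMemFos n l _).mp hmem with ⟨x, _, hx⟩
      exact pvFo_bounds n x _ hx
    · rw [if_neg hml] at h
      simp at h

theorem pvComp_sem (n : List Int) (l : List Int) (s : Int)
    (hs1 : 1 ≤ s) (hs2 : s ≤ (n.length : Int)) :
    (pvComp n s l = true) ↔
      ∃ v, pvBComp (pvBFos (pvBFirst n) l) l (if n.isEmpty then none else some 1) = some v ∧ v ≤ s := by
  have hlen := pvLenPos n s hs1 hs2
  have hnil : ¬ n = [] := by intro hh; rw [hh] at hlen; simp at hlen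
  have hflen : (pvBFos (pvBFirst n) l).length = (l.filterMap (pvFo n)).length := pvFosLen n l
  rw [pvComp, List.all_eq_true]
  by_cases hq : (pvBFos (pvBFirst n) l).length = l.length
  · have hall : ∀ x ∈ l, (pvFo n x).isSome := (pvFilterMapLen (pvFo n) l).mp (by rw [← hflen]; exact hq)
    rw [show pvBComp (pvBFos (pvBFirst n) l) l (if n.isEmpty then none else some 1)
        = some (PySem.List.maxD (pvBFos (pvBFirst n) l) (fun v => v) 1) from by
      simp [pvBComp, hq, hnil]]
    constructor
    · intro hcond
      refine ⟨_, rfl, ?_⟩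
      have hub : ∀ u ∈ pvBFos (pvBFirst n) l, u ≤ s := by
        intro u hu
        rcases (pvMemFos n l u).mp hu with ⟨x, hxl, hx⟩
        rcases (pvContainsPref n x s (by omega)).mp (hcond x hxl) with ⟨w, hw, hws⟩
        rw [hx] at hw
        cases hw
        exact hws
      show PySem.List.maxD (pvBFos (pvBFirst n) l) (fun v => v) 1 ≤ s
      rw [show PySem.List.maxD (pvBFos (pvBFirst n) l) (fun v => v) 1
          = (PySem.List.max? (pvBFos (pvBFirst n) l) (fun v => v)).getD 1 from rfl]
      cases hmax : PySem.List.max? (pvBFos (pvBFirst n) l) (fun v => v) with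
      | none => simpa using hs1
      | some mx =>
        simp only [Option.getD_some]
        exact hub mx (PySem.List.max?_mem hmax)
    · rintro ⟨v, hv, hvs⟩
      obtain rfl : PySem.List.maxD (pvBFos (pvBFirst n) l) (fun v => v) 1 = v := by simpa using hv
      intro x hxl
      rcases Option.isSome_iff_exists.mp (hall x hxl) with ⟨w, hw⟩
      refine (pvContainsPref n x s (by omega)).mpr ⟨w, hw, ?_⟩
      have hwm : w ∈ pvBFos (pvBFirst n) l := (pvMemFos n l w).mpr ⟨x, hxl, hw⟩
      cases hmax : PySem.List.max? (pvBFos (pvBFirst n) l) (fun v => v) with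
      | none =>
        rw [PySem.List.max?_eq_none_iff] at hmax
        rw [hmax] at hwm
        simp at hwm
      | some mx =>
        have hle : w ≤ mx := by simpa using PySem.List.max?_isMax hmax w hwm
        have : PySem.List.maxD (pvBFos (pvBFirst n) l) (fun v => v) 1 = mx := by
          rw [show PySem.List.maxD (pvBFos (pvBFirst n) l) (fun v => v) 1
              = (PySem.List.max? (pvBFos (pvBFirst n) l) (fun v => v)).getD 1 from rfl, hmax]
          rfl
        rw [this] at hvs
        omega
  · rw [show pvBComp (pvBFos (pvBFirst n) l) l (if n.isEmpty then none else some 1) = none from by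
      simp [pvBComp, hq]]
    constructor
    · intro hcond
      exfalso
      apply hq
      rw [hflen]
      rw [pvFilterMapLen (pvFo n) l]
      intro x hxl
      rcases (pvContainsPref n x s (by omega)).mp (hcond x hxl) with ⟨w, hw, _⟩
      simp [hw]
    · rintro ⟨v, hv, _⟩
      simp at hv

theorem pvComp_bnd (n : List Int) (l : List Int) (v : Int)
    (h : pvBComp (pvBFos (pvBFirst n) l) l (if n.isEmpty then none else some 1) = some v) :
    1 ≤ v ∧ v ≤ (n.length : Int) := by
  unfold pvBComp at h
  by_cases hq : (pvBFos (pvBFirst n) l).length = l.length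
  · rw [if_pos hq] at h
    by_cases hne : n.isEmpty
    · rw [hne] at h
      simp at h
    · have hlen : 0 < n.length := by
        have : n ≠ [] := by simpa [List.isEmpty_iff] using hne
        exact List.length_pos_iff.mpr this
      rw [pvAdSome n hlen] at h
      obtain rfl : PySem.List.maxD (pvBFos (pvBFirst n) l) (fun v => v) 1 = v := by simpa using h
      rw [show PySem.List.maxD (pvBFos (pvBFirst n) l) (fun v => v) 1
          = (PySem.List.max? (pvBFos (pvBFirst n) l) (fun v => v)).getD 1 from rfl]
      cases hmax : PySem.List.max? (pvBFos (pvBFirst n) l) (fun v => v) with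
      | none =>
        simp only [Option.getD_none]
        omega
      | some mx =>
        simp only [Option.getD_some]
        have hmem := PySem.List.max?_mem hmax
        rcases (pvMemFos n l mx).mp hmem with ⟨x, _, hx⟩
        exact pvFo_bounds n x mx hx
  · rw [if_neg hq] at h
    simp at h

-- ---- fold-level semantics ----
theorem pvOminSem (a b : Option Int) (s : Int) :
    (∃ v, pvOmin a b = some v ∧ v ≤ s) ↔ ((∃ v, a = some v ∧ v ≤ s) ∨ (∃ v, b = some v ∧ v ≤ s)) := by
  cases a with
  | none => simp [pvOmin]
  | some x =>
    cases b with
    | none => simp [pvOmin]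
    | some y =>
      simp only [pvOmin]
      split_ifs with hxy <;> simp <;> omega

theorem pvOminCases (a b : Option Int) (v : Int) (h : pvOmin a b = some v) :
    a = some v ∨ b = some v := by
  cases a with
  | none => exact Or.inr h
  | some x =>
    cases b with
    | none => exact Or.inl h
    | some y =>
      simp only [pvOmin] at h
      split_ifs at h <;> simp at h <;> subst h
      · exact Or.inl rfl
      · exact Or.inr rfl

theorem pvAllStepSem (a c : Option Int) (s : Int) :
    (∃ r, pvBAllStep a c = some r ∧ r ≤ s) ↔ ((∃ r, a = some r ∧ r ≤ s) ∧ (∃ v, c = some v ∧ v ≤ s)) := by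
  cases a with
  | none => simp [pvBAllStep]
  | some x =>
    cases c with
    | none => simp [pvBAllStep]
    | some y =>
      constructor
      · rintro ⟨r, hr, hrs⟩
        obtain rfl : max x y = r := by simpa [pvBAllStep] using hr
        exact ⟨⟨x, rfl, le_trans (le_max_left x y) hrs⟩, ⟨y, rfl, le_trans (le_max_right x y) hrs⟩⟩
      · rintro ⟨⟨r, hr, hrs⟩, ⟨w, hw, hws⟩⟩
        cases hr
        cases hw
        exact ⟨max x y, rfl, max_le hrs hws⟩

theorem pvAllStepCases (a c : Option Int) (v : Int) (h : pvBAllStep a c = some v) :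
    ∃ x y, a = some x ∧ c = some y ∧ v = max x y := by
  cases a with
  | none => simp [pvBAllStep] at h
  | some x =>
    cases c with
    | none => simp [pvBAllStep] at h
    | some y =>
      simp only [pvBAllStep, Option.some.injEq] at h
      exact ⟨x, y, rfl, rfl, h.symm⟩

theorem pvKenoSem (k a : Option Int) (s : Int) :
    (∃ v, pvBKeno k a = some v ∧ v ≤ s) ↔
      ((∃ v, k = some v ∧ v ≤ s) ∧ (∃ r, a = some r ∧ r ≤ s)) := by
  cases k with
  | none => simp [pvBKeno]
  | some x =>
    cases a with
    | none => simp [pvBKeno]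
    | some y =>
      constructor
      · rintro ⟨v, hv, hvs⟩
        obtain rfl : max y x = v := by simpa [pvBKeno] using hv
        exact ⟨⟨x, rfl, le_trans (le_max_right y x) hvs⟩, ⟨y, rfl, le_trans (le_max_left y x) hvs⟩⟩
      · rintro ⟨⟨w, hw, hws⟩, ⟨r, hr, hrs⟩⟩
        cases hw
        cases hr
        exact ⟨max y x, rfl, max_le hrs hws⟩

theorem pvFoldlOminSem {α : Type} (t : α → Option Int) (l : List α) (a0 : Option Int) (s : Int) :
    (∃ v, l.foldl (fun a x => pvOmin a (t x)) a0 = some v ∧ v ≤ s) ↔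
      ((∃ v, a0 = some v ∧ v ≤ s) ∨ ∃ x ∈ l, ∃ v, t x = some v ∧ v ≤ s) := by
  induction l generalizing a0 with
  | nil => simp
  | cons x t ih =>
    rw [List.foldl_cons, ih, pvOminSem]
    simp only [List.mem_cons]
    constructor
    · rintro ((ha | hx) | ⟨y, hy, hv⟩)
      · exact Or.inl ha
      · exact Or.inr ⟨x, Or.inl rfl, hx⟩
      · exact Or.inr ⟨y, Or.inr hy, hv⟩
    · rintro (ha | ⟨y, (rfl | hy), hv⟩)
      · exact Or.inl (Or.inl ha)
      · exact Or.inl (Or.inr hv)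
      · exact Or.inr ⟨y, hy, hv⟩

theorem pvFoldlOminBnd {α : Type} (t : α → Option Int) (l : List α) (a0 : Option Int)
    (P : Int → Prop) (ht : ∀ x ∈ l, ∀ v, t x = some v → P v) (ha : ∀ v, a0 = some v → P v) :
    ∀ v, l.foldl (fun a x => pvOmin a (t x)) a0 = some v → P v := by
  induction l generalizing a0 with
  | nil => exact ha
  | cons x t ih =>
    rw [List.foldl_cons]
    refine ih _ (fun y hy v hv => ht y (List.mem_cons_of_mem x hy) v hv) ?_
    intro v hv
    rcases pvOminCases _ _ _ hv with h1 | h2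
    · exact ha v h1
    · exact ht x (List.mem_cons_self) v h2

theorem pvFoldlAllSem {α : Type} (c : α → Option Int) (l : List α) (a0 : Option Int) (s : Int) :
    (∃ r, l.foldl (fun a x => pvBAllStep a (c x)) a0 = some r ∧ r ≤ s) ↔
      ((∃ r, a0 = some r ∧ r ≤ s) ∧ ∀ x ∈ l, ∃ v, c x = some v ∧ v ≤ s) := by
  induction l generalizing a0 with
  | nil => simp
  | cons x t ih =>
    rw [List.foldl_cons, ih]
    simp only [List.mem_cons]
    constructor
    · rintro ⟨hstep, hall⟩
      rcases (pvAllStepSem a0 (c x) s).mp hstep with ⟨ha, hx⟩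
      exact ⟨ha, fun y hy => hy.elim (fun he => he ▸ hx) (hall y)⟩
    · rintro ⟨ha, hall⟩
      refine ⟨(pvAllStepSem a0 (c x) s).mpr ⟨ha, hall x (Or.inl rfl)⟩, fun y hy => hall y (Or.inr hy)⟩

theorem pvFoldlAllBnd {α : Type} (c : α → Option Int) (l : List α) (a0 : Option Int)
    (P : Int → Prop) (hmax : ∀ a b, P a → P b → P (max a b))
    (hc : ∀ x ∈ l, ∀ v, c x = some v → P v) (ha : ∀ v, a0 = some v → P v) :
    ∀ v, l.foldl (fun a x => pvBAllStep a (c x)) a0 = some v → P v := by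
  induction l generalizing a0 with
  | nil => exact ha
  | cons x t ih =>
    rw [List.foldl_cons]
    refine ih _ (fun y hy v hv => hc y (List.mem_cons_of_mem x hy) v hv) ?_
    intro v hv
    rcases pvAllStepCases _ _ _ hv with ⟨p, q, hp, hq, rfl⟩
    exact hmax p q (ha p hp) (hc x (List.mem_cons_self) q hq)

-- ---- card-level semantics ----
theorem pvBCard_eq (first : PySem.Dict Int Int) (m : Int) (ad : Option Int)
    (cart : List (String × List Int)) :
    pvBCard first m ad cart =
      ((pvVals cart).foldl (fun a l => pvOmin a (pvBThr (pvBFos first l) m ad)) none,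
       (pvVals cart).foldl (fun a l => pvOmin a (pvBComp (pvBFos first l) l ad)) none,
       (pvVals cart).foldl (fun a l => pvBAllStep a (pvBComp (pvBFos first l) l ad)) ad) := by
  unfold pvBCard pvVals
  rw [show pvBLineStep first m ad = (fun st linha =>
      (pvOmin st.1 (pvBThr (pvBFos first linha) m ad),
       pvOmin st.2.1 (pvBComp (pvBFos first linha) linha ad),
       pvBAllStep st.2.2 (pvBComp (pvBFos first linha) linha ad))) from rfl]
  exact pvFoldlProd3 (fun a l => pvOmin a (pvBThr (pvBFos first l) m ad))
    (fun a l => pvOmin a (pvBComp (pvBFos first l) l ad))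
    (fun a l => pvBAllStep a (pvBComp (pvBFos first l) l ad)) _ none none ad

theorem pvDK_sem (n : List Int) (m : Int) (cart : List (String × List Int)) (s : Int)
    (hs1 : 1 ≤ s) (hs2 : s ≤ (n.length : Int)) :
    pvCondK n m cart s = true ↔
      ∃ v, (pvBCard (pvBFirst n) m (if n.isEmpty then none else some 1) cart).1 = some v ∧ v ≤ s := by
  rw [pvCondK, List.any_eq_true, pvBCard_eq]
  dsimp only
  rw [pvFoldlOminSem]
  constructor
  · rintro ⟨l, hl, hdec⟩
    exact Or.inr ⟨l, hl, (pvThr_sem n m l s hs1 hs2).mp (by simpa using hdec)⟩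
  · rintro (⟨v, hv, _⟩ | ⟨l, hl, hv⟩)
    · simp at hv
    · exact ⟨l, hl, by simpa using (pvThr_sem n m l s hs1 hs2).mpr hv⟩

theorem pvDK_bnd (n : List Int) (m : Int) (cart : List (String × List Int)) (v : Int)
    (h : (pvBCard (pvBFirst n) m (if n.isEmpty then none else some 1) cart).1 = some v) :
    1 ≤ v ∧ v ≤ (n.length : Int) := by
  rw [pvBCard_eq] at h
  dsimp only at h
  exact pvFoldlOminBnd _ _ none (fun v => 1 ≤ v ∧ v ≤ (n.length : Int))
    (fun l _ w hw => pvThr_bnd n m l w hw) (by simp) v h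

theorem pvDI_sem (n : List Int) (m : Int) (cart : List (String × List Int)) (s : Int)
    (hs1 : 1 ≤ s) (hs2 : s ≤ (n.length : Int)) :
    pvCondI n cart s = true ↔
      ∃ v, (pvBCard (pvBFirst n) m (if n.isEmpty then none else some 1) cart).2.1 = some v ∧ v ≤ s := by
  rw [pvCondI, List.any_eq_true, pvBCard_eq]
  dsimp only
  rw [pvFoldlOminSem]
  constructor
  · rintro ⟨l, hl, hc⟩
    exact Or.inr ⟨l, hl, (pvComp_sem n l s hs1 hs2).mp hc⟩
  · rintro (⟨v, hv, _⟩ | ⟨l, hl, hv⟩)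
    · simp at hv
    · exact ⟨l, hl, (pvComp_sem n l s hs1 hs2).mpr hv⟩

theorem pvDI_bnd (n : List Int) (m : Int) (cart : List (String × List Int)) (v : Int)
    (h : (pvBCard (pvBFirst n) m (if n.isEmpty then none else some 1) cart).2.1 = some v) :
    1 ≤ v ∧ v ≤ (n.length : Int) := by
  rw [pvBCard_eq] at h
  dsimp only at h
  exact pvFoldlOminBnd _ _ none (fun v => 1 ≤ v ∧ v ≤ (n.length : Int))
    (fun l _ w hw => pvComp_bnd n l w hw) (by simp) v h

theorem pvDE_sem (n : List Int) (m : Int) (cart : List (String × List Int)) (s : Int)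
    (hs1 : 1 ≤ s) (hs2 : s ≤ (n.length : Int)) :
    pvCondE n m cart s = true ↔
      ∃ v, pvBKeno (pvBCard (pvBFirst n) m (if n.isEmpty then none else some 1) cart).1
             (pvBCard (pvBFirst n) m (if n.isEmpty then none else some 1) cart).2.2 = some v ∧ v ≤ s := by
  have hK := pvDK_sem n m cart s hs1 hs2
  rw [pvBCard_eq] at hK
  dsimp only at hK
  rw [pvCondE, Bool.and_eq_true, List.all_eq_true, pvBCard_eq]
  dsimp only
  rw [pvKenoSem]
  have hlen := pvLenPos n s hs1 hs2
  have hnil : ¬ n = [] := by intro hh; rw [hh] at hlen; simp at hlen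
  have hAll : (∀ l ∈ pvVals cart, pvComp n s l = true) ↔
      ∃ r, (pvVals cart).foldl
          (fun a l => pvBAllStep a (pvBComp (pvBFos (pvBFirst n) l) l (if n.isEmpty then none else some 1)))
          (if n.isEmpty then none else some 1) = some r ∧ r ≤ s := by
    rw [pvFoldlAllSem]
    constructor
    · intro hall
      exact ⟨⟨1, by simp [hnil], hs1⟩, fun l hl => (pvComp_sem n l s hs1 hs2).mp (hall l hl)⟩
    · rintro ⟨_, hall⟩
      exact fun l hl => (pvComp_sem n l s hs1 hs2).mpr (hall l hl)
  rw [← hK, ← hAll]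
  exact and_comm

theorem pvDE_bnd (n : List Int) (m : Int) (cart : List (String × List Int)) (v : Int)
    (h : pvBKeno (pvBCard (pvBFirst n) m (if n.isEmpty then none else some 1) cart).1
           (pvBCard (pvBFirst n) m (if n.isEmpty then none else some 1) cart).2.2 = some v) :
    1 ≤ v ∧ v ≤ (n.length : Int) := by
  unfold pvBKeno at h
  rcases hk : (pvBCard (pvBFirst n) m (if n.isEmpty then none else some 1) cart).1 with _ | kv
  · rw [hk] at h
    simp at h
  · rcases hal : (pvBCard (pvBFirst n) m (if n.isEmpty then none else some 1) cart).2.2 with _ | av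
    · rw [hk, hal] at h
      simp at h
    · rw [hk, hal] at h
      simp only [Option.some.injEq] at h
      subst h
      have h1 := pvDK_bnd n m cart kv hk
      have h2 : 1 ≤ av ∧ av ≤ (n.length : Int) := by
        rw [pvBCard_eq] at hal
        dsimp only at hal
        refine pvFoldlAllBnd _ _ _ (fun v => 1 ≤ v ∧ v ≤ (n.length : Int))
          (fun a b ha hb => ?_) (fun l _ w hw => pvComp_bnd n l w hw) (fun w hw => ?_) av hal
        · exact ⟨le_trans ha.1 (le_max_left a b), max_le ha.2 hb.2⟩
        · by_cases hne : n.isEmpty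
          · rw [if_pos hne] at hw
            simp at hw
          · rw [if_neg hne] at hw
            obtain rfl : (1 : Int) = w := by simpa using hw
            have hnil : n ≠ [] := by simpa [List.isEmpty_iff] using hne
            have := List.length_pos_iff.mpr hnil
            omega
      exact ⟨le_trans h1.1 (le_max_right av kv), max_le h2.2 h1.2⟩

-- ---- the best fold ----
def pvLexLe (a b : Int × Int) : Prop := a.1 < b.1 ∨ (a.1 = b.1 ∧ a.2 ≤ b.2)

theorem pvLexLe_trans (a b c : Int × Int) (h1 : pvLexLe a b) (h2 : pvLexLe b c) : pvLexLe a c := by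
  unfold pvLexLe at *
  omega

theorem pvBBestNone (b : Option (Int × Int)) (d : Option Int) (ci : Int) :
    pvBBest b d ci = none ↔ b = none ∧ d = none := by
  cases d with
  | none => simp [pvBBest]
  | some v =>
    cases b with
    | none => simp [pvBBest]
    | some b' =>
      simp only [pvBBest]
      split_ifs <;> simp

theorem pvBBestCases (b : Option (Int × Int)) (d : Option Int) (ci : Int) (x : Int × Int)
    (h : pvBBest b d ci = some x) : b = some x ∨ ∃ w, d = some w ∧ x = (w, ci) := by
  cases d with
  | none => exact Or.inl h
  | some v =>
    cases b with
    | none =>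
      refine Or.inr ⟨v, rfl, ?_⟩
      simpa [pvBBest] using h.symm
    | some b' =>
      simp only [pvBBest] at h
      split_ifs at h
      · exact Or.inr ⟨v, rfl, by simpa using h.symm⟩
      · exact Or.inl h

theorem pvBBestLe1 (b : Option (Int × Int)) (d : Option Int) (ci : Int) (x : Int × Int)
    (h : pvBBest b d ci = some x) : ∀ b', b = some b' → pvLexLe x b' := by
  rintro b' rfl
  cases d with
  | none =>
    obtain rfl : b' = x := by simpa [pvBBest] using h
    unfold pvLexLe
    omega
  | some v =>
    simp only [pvBBest] at h
    split_ifs at h with hc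
    · obtain rfl : (v, ci) = x := by simpa using h
      unfold pvLexLe
      rcases hc with h1 | ⟨h1, h2⟩
      · exact Or.inl h1
      · exact Or.inr ⟨h1, le_of_lt h2⟩
    · obtain rfl : b' = x := by simpa using h
      unfold pvLexLe
      omega

theorem pvBBestLe2 (b : Option (Int × Int)) (d : Option Int) (ci : Int) (x : Int × Int)
    (h : pvBBest b d ci = some x) : ∀ w, d = some w → pvLexLe x (w, ci) := by
  rintro w rfl
  cases b with
  | none =>
    obtain rfl : (w, ci) = x := by simpa [pvBBest] using h
    unfold pvLexLe
    omega
  | some b' =>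
    simp only [pvBBest] at h
    split_ifs at h with hc
    · obtain rfl : (w, ci) = x := by simpa using h
      unfold pvLexLe
      omega
    · obtain rfl : b' = x := by simpa using h
      unfold pvLexLe
      dsimp only
      by_cases heq : w = b'.1
      · refine Or.inr ⟨heq.symm, ?_⟩
        by_contra hlt
        exact hc (Or.inr ⟨heq, by omega⟩)
      · refine Or.inl ?_
        by_contra hge
        exact hc (Or.inl (by omega))

theorem pvBestFoldAux {γ : Type} (dd : γ → Option Int) (l : List (Int × γ))
    (b0 : Option (Int × Int)) (v ci : Int)
    (h : l.foldl (fun b p => pvBBest b (dd p.2) p.1) b0 = some (v, ci)) :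
    (b0 = some (v, ci) ∨ ∃ p ∈ l, p.1 = ci ∧ dd p.2 = some v) ∧
      (∀ p ∈ l, ∀ w, dd p.2 = some w → pvLexLe (v, ci) (w, p.1)) ∧
      (∀ b, b0 = some b → pvLexLe (v, ci) b) := by
  induction l generalizing b0 with
  | nil =>
    simp only [List.foldl_nil] at h
    refine ⟨Or.inl h, by simp, ?_⟩
    rintro b rfl
    obtain rfl : b = (v, ci) := by simpa using h
    unfold pvLexLe
    omega
  | cons p t ih =>
    rw [List.foldl_cons] at h
    rcases ih _ h with ⟨hfirst, hrest, hacc⟩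
    have hb1 : ∀ b, pvBBest b0 (dd p.2) p.1 = some b → pvLexLe (v, ci) b := hacc
    constructor
    · rcases hfirst with hb | ⟨p', hp', hc', hd'⟩
      · rcases pvBBestCases b0 (dd p.2) p.1 _ hb with hb0 | ⟨w, hw, hx⟩
        · exact Or.inl hb0
        · rw [Prod.mk.injEq] at hx
          refine Or.inr ⟨p, List.mem_cons_self, hx.2.symm, ?_⟩
          rw [hw, hx.1]
      · exact Or.inr ⟨p', List.mem_cons_of_mem p hp', hc', hd'⟩
    · constructor
      · intro p' hp' w hw
        rcases List.mem_cons.mp hp' with rfl | hpt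
        · -- the head: b1 is some since dd p'.2 = some w
          rcases hb1v : pvBBest b0 (dd p'.2) p'.1 with _ | b1
          · rw [(pvBBestNone b0 (dd p'.2) p'.1).mp hb1v |>.2] at hw
            simp at hw
          · exact pvLexLe_trans _ _ _ (hacc b1 hb1v) (pvBBestLe2 b0 (dd p'.2) p'.1 b1 hb1v w hw)
        · exact hrest p' hpt w hw
      · rintro b rfl
        rcases hb1v : pvBBest (some b) (dd p.2) p.1 with _ | b1
        · exact absurd ((pvBBestNone _ _ _).mp hb1v).1 (by simp)
        · exact pvLexLe_trans _ _ _ (hacc b1 hb1v) (pvBBestLe1 _ _ _ b1 hb1v b rfl)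

theorem pvBestFoldSomeAcc {γ : Type} (dd : γ → Option Int) (l : List (Int × γ)) (b : Int × Int) :
    l.foldl (fun b p => pvBBest b (dd p.2) p.1) (some b) ≠ none := by
  induction l generalizing b with
  | nil => simp
  | cons p t ih =>
    rw [List.foldl_cons]
    rcases hb1 : pvBBest (some b) (dd p.2) p.1 with _ | b1
    · have := ((pvBBestNone _ _ _).mp hb1).1
      simp at this
    · exact ih b1

theorem pvBestFoldNone {γ : Type} (dd : γ → Option Int) (l : List (Int × γ)) :
    l.foldl (fun b p => pvBBest b (dd p.2) p.1) none = none ↔ ∀ p ∈ l, dd p.2 = none := by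
  induction l with
  | nil => simp
  | cons p t ih =>
    rw [List.foldl_cons]
    constructor
    · intro h
      rcases hb1 : pvBBest none (dd p.2) p.1 with _ | b1
      · have hd := ((pvBBestNone none (dd p.2) p.1).mp hb1).2
        intro p' hp'
        rcases List.mem_cons.mp hp' with rfl | hpt
        · exact hd
        · rw [hb1] at h
          exact ih.mp h p' hpt
      · rw [hb1] at h
        exact absurd h (pvBestFoldSomeAcc dd t b1)
    · intro hall
      have hb1 : pvBBest none (dd p.2) p.1 = none :=
        (pvBBestNone none (dd p.2) p.1).mpr ⟨rfl, hall p List.mem_cons_self⟩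
      rw [hb1]
      exact ih.mpr (fun p' hp' => hall p' (List.mem_cons_of_mem p hp'))

theorem pvBestFoldSome {γ : Type} (dd : γ → Option Int) (l : List (Int × γ)) (v ci : Int)
    (h : l.foldl (fun b p => pvBBest b (dd p.2) p.1) none = some (v, ci)) :
    (∃ p ∈ l, p.1 = ci ∧ dd p.2 = some v) ∧
      ∀ p ∈ l, ∀ w, dd p.2 = some w → pvLexLe (v, ci) (w, p.1) := by
  rcases pvBestFoldAux dd l none v ci h with ⟨hfirst, hrest, -⟩
  rcases hfirst with hb | hex
  · simp at hb
  · exact ⟨hex, hrest⟩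

-- ---- pairs structure ----
theorem pvPairs_pairwise (c : List (List (String × List Int))) (n : List Int) :
    (pvPairs c n).Pairwise (fun x y => x.1 < y.1 ∨ (x.1 = y.1 ∧ x.2.1 < y.2.1)) := by
  unfold pvPairs
  have hE := PySem.List.pairwise_lt_enumerate n 1
  generalize PySem.List.enumerate n 1 = E at hE ⊢
  induction E with
  | nil => simp
  | cons q E' ihE =>
    rw [List.flatMap_cons, List.pairwise_append]
    refine ⟨?_, ihE (List.pairwise_cons.mp hE).2, ?_⟩
    · rw [List.pairwise_map]
      refine List.Pairwise.imp ?_ (PySem.List.pairwise_lt_enumerate c 0)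
      intro p p' hpp
      exact Or.inr ⟨rfl, hpp⟩
    · intro a ha b hb
      rcases List.mem_map.mp ha with ⟨p, -, rfl⟩
      rcases List.mem_flatMap.mp hb with ⟨q', hq', hbq⟩
      rcases List.mem_map.mp hbq with ⟨p', -, rfl⟩
      exact Or.inl ((List.pairwise_cons.mp hE).1 q' hq')

theorem pvMemPairs (c : List (List (String × List Int))) (n : List Int)
    (x : Int × (Int × List (String × List Int))) :
    x ∈ pvPairs c n ↔ (∃ y, (x.1, y) ∈ PySem.List.enumerate n 1) ∧ x.2 ∈ PySem.List.enumerate c 0 := by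
  unfold pvPairs
  rw [List.mem_flatMap]
  constructor
  · rintro ⟨q, hq, hx⟩
    rcases List.mem_map.mp hx with ⟨p, hp, rfl⟩
    exact ⟨⟨q.2, by simpa using hq⟩, hp⟩
  · rintro ⟨⟨y, hy⟩, hx2⟩
    refine ⟨(x.1, y), hy, List.mem_map.mpr ⟨x.2, hx2, rfl⟩⟩

theorem pvMemEnumN (n : List Int) (s : Int) (hs1 : 1 ≤ s) (hs2 : s ≤ (n.length : Int)) :
    ∃ y, (s, y) ∈ PySem.List.enumerate n 1 := by
  have hk : (s - 1).toNat < n.length := by omega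
  refine ⟨n[(s-1).toNat], (PySem.List.mem_enumerate_iff n 1 _).mpr ⟨(s-1).toNat, hk, ?_⟩⟩
  rw [Prod.mk.injEq]
  exact ⟨by omega, rfl⟩

theorem pvEnumFstBounds (n : List Int) (s y : Int) (h : (s, y) ∈ PySem.List.enumerate n 1) :
    1 ≤ s ∧ s ≤ (n.length : Int) := by
  rcases (PySem.List.mem_enumerate_iff n 1 _).mp h with ⟨k, hk, heq⟩
  rw [Prod.mk.injEq] at heq
  obtain ⟨h1, -⟩ := heq
  omega

-- ---- the main generic argument ----
theorem pvMain (c : List (List (String × List Int))) (n : List Int)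
    (cond : List (String × List Int) → Int → Bool) (dd : List (String × List Int) → Option Int)
    (sem : ∀ cart s, 1 ≤ s → s ≤ (n.length : Int) → (cond cart s = true ↔ ∃ v, dd cart = some v ∧ v ≤ s))
    (bnd : ∀ cart v, dd cart = some v → 1 ≤ v ∧ v ≤ (n.length : Int)) :
    ((pvPairs c n).find? (fun x => cond x.2.2 x.1)).map (fun x => (x.2.1, x.1))
      = ((PySem.List.enumerate c 0).foldl (fun b p => pvBBest b (dd p.2) p.1) none).map (fun b => (b.2, b.1)) := by
  rcases hf : (pvPairs c n).find? (fun x => cond x.2.2 x.1) with _ | x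
  · have hnone : ∀ x ∈ pvPairs c n, ¬ cond x.2.2 x.1 = true := by
      intro x hx
      have := List.find?_eq_none.mp hf x hx
      simpa using this
    have hdd : ∀ p ∈ PySem.List.enumerate c 0, dd p.2 = none := by
      intro p hp
      rcases hdp : dd p.2 with _ | v
      · rfl
      · exfalso
        rcases bnd p.2 v hdp with ⟨hv1, hv2⟩
        rcases pvMemEnumN n v hv1 hv2 with ⟨y, hy⟩
        have hmem : (v, p) ∈ pvPairs c n := (pvMemPairs c n (v, p)).mpr ⟨⟨y, hy⟩, hp⟩
        exact hnone (v, p) hmem ((sem p.2 v hv1 hv2).mpr ⟨v, hdp, le_refl v⟩)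
    rw [(pvBestFoldNone dd (PySem.List.enumerate c 0)).mpr hdd, hf]
    rfl
  · have hcx : cond x.2.2 x.1 = true := by
      have := List.find?_some hf
      simpa using this
    have hxmem : x ∈ pvPairs c n := List.mem_of_find?_eq_some hf
    rcases (pvMemPairs c n x).mp hxmem with ⟨⟨y, hy⟩, hx2⟩
    rcases pvEnumFstBounds n x.1 y hy with ⟨hs1, hs2⟩
    rcases (sem x.2.2 x.1 hs1 hs2).mp hcx with ⟨w, hw, hws⟩
    rcases hres : (PySem.List.enumerate c 0).foldl (fun b p => pvBBest b (dd p.2) p.1) none with _ | b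
    · exfalso
      have := (pvBestFoldNone dd (PySem.List.enumerate c 0)).mp hres x.2 hx2
      rw [hw] at this
      simp at this
    · obtain ⟨v, ci⟩ := b
      rcases pvBestFoldSome dd _ v ci hres with ⟨⟨p, hp, hpci, hpdd⟩, hmin⟩
      rcases bnd p.2 v hpdd with ⟨hv1, hv2⟩
      rcases pvMemEnumN n v hv1 hv2 with ⟨y', hy'⟩
      have hpmem : (v, p) ∈ pvPairs c n := (pvMemPairs c n (v, p)).mpr ⟨⟨y', hy'⟩, hp⟩
      have hpcond : cond p.2 v = true := (sem p.2 v hv1 hv2).mpr ⟨v, hpdd, le_refl v⟩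
      have hfirst := pvFindFirst _ (pvPairs c n) (pvPairs_pairwise c n)
        (fun x => cond x.2.2 x.1) x hf (v, p) hpmem hpcond
      have hle : pvLexLe (v, ci) (w, x.2.1) := hmin x.2 hx2 w hw
      unfold pvLexLe at hle
      rw [hf, hres]
      rcases hfirst with heq | hloc
      · rw [heq]
        simp [hpci]
      · exfalso
        rcases hloc with h1 | ⟨h1, h2⟩
        · dsimp only at h1
          omega
        · dsimp only at h1 h2
          rw [hpci] at h2
          omega

-- ---- B characterization ----
theorem pvB_char (c : List (List (String × List Int))) (n : List Int) (m : Int) :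
    verificar_estado_cartela_alt c n m =
      (((PySem.List.enumerate c 0).foldl
          (fun b p => pvBBest b (pvBCard (pvBFirst n) m (if n.isEmpty then none else some 1) p.2).1 p.1) none).map (fun b => (b.2, b.1)),
       ((PySem.List.enumerate c 0).foldl
          (fun b p => pvBBest b (pvBCard (pvBFirst n) m (if n.isEmpty then none else some 1) p.2).2.1 p.1) none).map (fun b => (b.2, b.1)),
       ((PySem.List.enumerate c 0).foldl
          (fun b p => pvBBest b (pvBKeno (pvBCard (pvBFirst n) m (if n.isEmpty then none else some 1) p.2).1
              (pvBCard (pvBFirst n) m (if n.isEmpty then none else some 1) p.2).2.2) p.1) none).map (fun b => (b.2, b.1))) := by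
  show (((PySem.List.enumerate c 0).foldl (fun st x =>
      (pvBBest st.1 (pvBCard (pvBFirst n) m (if n.isEmpty then none else some 1) x.2).1 x.1,
       pvBBest st.2.1 (pvBCard (pvBFirst n) m (if n.isEmpty then none else some 1) x.2).2.1 x.1,
       pvBBest st.2.2 (pvBKeno (pvBCard (pvBFirst n) m (if n.isEmpty then none else some 1) x.2).1
         (pvBCard (pvBFirst n) m (if n.isEmpty then none else some 1) x.2).2.2) x.1)) (none, none, none)).1.map (fun b => (b.2, b.1)),
     ((PySem.List.enumerate c 0).foldl (fun st x =>
      (pvBBest st.1 (pvBCard (pvBFirst n) m (if n.isEmpty then none else some 1) x.2).1 x.1,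
       pvBBest st.2.1 (pvBCard (pvBFirst n) m (if n.isEmpty then none else some 1) x.2).2.1 x.1,
       pvBBest st.2.2 (pvBKeno (pvBCard (pvBFirst n) m (if n.isEmpty then none else some 1) x.2).1
         (pvBCard (pvBFirst n) m (if n.isEmpty then none else some 1) x.2).2.2) x.1)) (none, none, none)).2.1.map (fun b => (b.2, b.1)),
     ((PySem.List.enumerate c 0).foldl (fun st x =>
      (pvBBest st.1 (pvBCard (pvBFirst n) m (if n.isEmpty then none else some 1) x.2).1 x.1,
       pvBBest st.2.1 (pvBCard (pvBFirst n) m (if n.isEmpty then none else some 1) x.2).2.1 x.1,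
       pvBBest st.2.2 (pvBKeno (pvBCard (pvBFirst n) m (if n.isEmpty then none else some 1) x.2).1
         (pvBCard (pvBFirst n) m (if n.isEmpty then none else some 1) x.2).2.2) x.1)) (none, none, none)).2.2.map (fun b => (b.2, b.1))) = _
  have h3 := pvFoldlProd3
    (fun (b : Option (Int × Int)) (x : Int × List (String × List Int)) =>
      pvBBest b (pvBCard (pvBFirst n) m (if n.isEmpty then none else some 1) x.2).1 x.1)
    (fun (b : Option (Int × Int)) (x : Int × List (String × List Int)) =>
      pvBBest b (pvBCard (pvBFirst n) m (if n.isEmpty then none else some 1) x.2).2.1 x.1)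
    (fun (b : Option (Int × Int)) (x : Int × List (String × List Int)) =>
      pvBBest b (pvBKeno (pvBCard (pvBFirst n) m (if n.isEmpty then none else some 1) x.2).1
        (pvBCard (pvBFirst n) m (if n.isEmpty then none else some 1) x.2).2.2) x.1)
    (PySem.List.enumerate c 0) none none none
  rw [h3]

-- ===== VERDICT (by name: the statement is the Claim_ definition above) =====
theorem verificar_estado_cartela_spec : Claim_equal_verificar_estado_cartela := by
  intro c n m _
  unfold Spec_verificar_estado_cartela
  rw [pvA_char, pvB_char]
  refine congrArg₂ Prod.mk ?_ (congrArg₂ Prod.mk ?_ ?_)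
  · exact pvMain c n _ _ (fun cart s h1 h2 => pvDK_sem n m cart s h1 h2) (fun cart v h => pvDK_bnd n m cart v h)
  · exact pvMain c n _ _ (fun cart s h1 h2 => pvDI_sem n m cart s h1 h2) (fun cart v h => pvDI_bnd n m cart v h)
  · exact pvMain c n _ _ (fun cart s h1 h2 => pvDE_sem n m cart s h1 h2) (fun cart v h => pvDE_bnd n m cart v h)
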